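-- pv_equiv track=rewrite | github.com/AE-nv/aedvent-code-2023 | day 03/Thibaut - python/day03.py | has_symbolic_neighbours
-- ===== SOURCE A (Python) =====
-- def has_symbolic_neighbours(start, end, y_data, data):
--     locations = []
--     for x in range(start-1, end+1):
--         for y in range(y_data-1, y_data+2):
--             if y >=0 and y < len(data) and x>=0 and x<len(data[0].rstrip()):
--                 locations.append((x,y))
--                 if not data[y][x].isnumeric() and not data[y][x]=='.':
--                     return True
--     return False
-- ===== SOURCE B (Python) =====
-- def has_symbolic_neighbours(start, end, y_data, data):
--     if not data:
--         return False
--     W = len(data[0].rstrip())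
--     symbols = [(x, y)
--                for y, row in enumerate(data)
--                for x, ch in enumerate(row)
--                if not ch.isnumeric() and ch != '.']
--     return any(start - 1 <= x <= end and x < W
--                and y_data - 1 <= y <= y_data + 1
--                for x, y in symbols)
-- ===== Notes on version B (the rewrite author's own statement) =====
-- stated objective: alternative
-- what changed: Replaces A's cell-by-cell window scan with early return (and its dead 'locations' list) by two staged passes: first build an index of every symbol coordinate in the whole grid, then test each indexed symbol arithmetically against the window rectangle.
-- outside the precondition, e.g. on has_symbolic_neighbours(0, 4, 2, ['0.0#', '##', '#00.']): A returns True, B returns True; on has_symbolic_neighbours(0, 3, 1, ['...#', '']): A raises IndexError, B returns True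
import Mathlib
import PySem

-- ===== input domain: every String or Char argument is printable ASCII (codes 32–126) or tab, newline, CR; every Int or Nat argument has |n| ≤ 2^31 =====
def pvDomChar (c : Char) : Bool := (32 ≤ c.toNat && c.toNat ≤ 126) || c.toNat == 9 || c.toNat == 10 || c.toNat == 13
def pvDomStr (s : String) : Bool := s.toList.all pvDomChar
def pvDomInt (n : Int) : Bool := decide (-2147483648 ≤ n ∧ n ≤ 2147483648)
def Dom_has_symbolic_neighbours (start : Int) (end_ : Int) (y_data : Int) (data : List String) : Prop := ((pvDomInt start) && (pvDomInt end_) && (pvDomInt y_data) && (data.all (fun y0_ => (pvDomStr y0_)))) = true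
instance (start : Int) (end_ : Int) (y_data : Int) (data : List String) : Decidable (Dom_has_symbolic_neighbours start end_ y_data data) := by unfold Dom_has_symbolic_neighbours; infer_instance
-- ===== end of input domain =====

-- B replaces A's cell-by-cell window scan with early return (and its dead 'locations'
-- list) by two staged passes: first index every symbol coordinate of the whole grid,
-- then test each indexed symbol arithmetically against the window rectangle; objective:
-- alternative (trades the windowed scan for a full-grid index plus a range test).

-- ===== PORT A =====
-- Literal port of A.  The 'locations' list is write-only (never read) and so carries no
-- state; '.isnumeric()' on the printable-ASCII domain is exactly Chars.isdigit.
def has_symbolic_neighbours (start : Int) (end_ : Int) (y_data : Int) (data : List String) : Bool :=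
  (PySem.List.pyRange (start - 1) (end_ + 1) 1).any fun x =>
    (PySem.List.pyRange (y_data - 1) (y_data + 2) 1).any fun y =>
      if 0 ≤ y ∧ y < (data.length : Int) ∧ 0 ≤ x ∧
          x < ((PySem.Str.rstrip (data.headD "")).toList.length : Int) then
        match PySem.List.pyGet? data y with
        | none => false
        | some row =>
          match PySem.Str.pyGet? row x with
          | none => false  -- Python raises IndexError here; such inputs are outside Pre_
          | some c => !PySem.Chars.isdigit c && !(c == '.')
      else false

-- ===== PORT B =====
def has_symbolic_neighbours_alt (start : Int) (end_ : Int) (y_data : Int) (data : List String) : Bool :=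
  if data.isEmpty then false
  else
    let W : Int := ((PySem.Str.rstrip (data.headD "")).toList.length : Int)
    let symbols : List (Int × Int) :=
      (PySem.List.enumerate data).flatMap fun yr =>
        (PySem.List.enumerate yr.2.toList).filterMap fun xc =>
          if !PySem.Chars.isdigit xc.2 && !(xc.2 == '.') then some (xc.1, yr.1) else none
    symbols.any fun p =>
      decide (start - 1 ≤ p.1 ∧ p.1 ≤ end_ ∧ p.1 < W ∧
        y_data - 1 ≤ p.2 ∧ p.2 ≤ y_data + 1)

-- ===== PRECONDITION & SPEC =====
-- Pre_ excludes ragged grids on which A's scan indexes a window cell past the end of a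
-- short row: there A raises IndexError (or, depending on scan order, returns a value only
-- because an earlier cell was a symbol), while B's full-grid index never indexes at all.
def Pre_has_symbolic_neighbours (start : Int) (end_ : Int) (y_data : Int) (data : List String) : Prop :=
  ∀ i : Nat, i < data.length → y_data - 1 ≤ (i : Int) → (i : Int) < y_data + 2 →
    max (start - 1) 0 < min (end_ + 1) ((PySem.Str.rstrip (data.headD "")).toList.length : Int) →
    min (end_ + 1) ((PySem.Str.rstrip (data.headD "")).toList.length : Int)
      ≤ ((data.getD i "").toList.length : Int)
instance (start : Int) (end_ : Int) (y_data : Int) (data : List String) : Decidable (Pre_has_symbolic_neighbours start end_ y_data data) := by unfold Pre_has_symbolic_neighbours; infer_instance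

def pvWitness_has_symbolic_neighbours : Int × Int × Int × List String := (0, 1, 0, ["*."])

def Spec_has_symbolic_neighbours (start : Int) (end_ : Int) (y_data : Int) (data : List String) (out : Bool) : Prop := out = has_symbolic_neighbours_alt start end_ y_data data
instance (start : Int) (end_ : Int) (y_data : Int) (data : List String) (out : Bool) : Decidable (Spec_has_symbolic_neighbours start end_ y_data data out) := by unfold Spec_has_symbolic_neighbours; infer_instance

-- ===== CLAIM (what is proved, stated in full; the proofs are below) =====
def Claim_equal_has_symbolic_neighbours : Prop := ∀ (start : Int) (end_ : Int) (y_data : Int) (data : List String), Dom_has_symbolic_neighbours start end_ y_data data → Pre_has_symbolic_neighbours start end_ y_data data → Spec_has_symbolic_neighbours start end_ y_data data (has_symbolic_neighbours start end_ y_data data)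

-- ===== LEMMAS AND PROOFS =====

-- common normal form: a symbol cell exists in the window rectangle
def pvFound (start : Int) (end_ : Int) (y_data : Int) (data : List String) : Prop :=
  ∃ (i j : Nat), i < data.length ∧ y_data - 1 ≤ (i : Int) ∧ (i : Int) < y_data + 2 ∧
    start - 1 ≤ (j : Int) ∧ (j : Int) < end_ + 1 ∧
    (j : Int) < ((PySem.Str.rstrip (data.headD "")).toList.length : Int) ∧
    ∃ h : j < (data.getD i "").toList.length,
      (!PySem.Chars.isdigit ((data.getD i "").toList[j]) && !((data.getD i "").toList[j] == '.')) = true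

lemma a_iff (start end_ y_data : Int) (data : List String)
    (hpre : Pre_has_symbolic_neighbours start end_ y_data data) :
    has_symbolic_neighbours start end_ y_data data = true ↔ pvFound start end_ y_data data := by
  unfold has_symbolic_neighbours pvFound
  constructor
  · intro h
    simp only [List.any_eq_true, PySem.List.mem_pyRange_one] at h
    obtain ⟨x, ⟨hx1, hx2⟩, y, ⟨hy1, hy2⟩, hcell⟩ := h
    by_cases hc : 0 ≤ y ∧ y < (data.length : Int) ∧ 0 ≤ x ∧
        x < ((PySem.Str.rstrip (data.headD "")).toList.length : Int)
    · rw [if_pos hc] at hcell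
      obtain ⟨hy0, hylen, hx0, hxW⟩ := hc
      obtain ⟨m, rfl⟩ : ∃ m : ℕ, y = (m : Int) := ⟨y.toNat, (Int.toNat_of_nonneg hy0).symm⟩
      obtain ⟨n, rfl⟩ : ∃ n : ℕ, x = (n : Int) := ⟨x.toNat, (Int.toNat_of_nonneg hx0).symm⟩
      have hm : m < data.length := by omega
      have hlen := hpre m hm (by omega) (by omega) (by omega)
      have hn : n < (data.getD m "").toList.length := by omega
      have hrow : PySem.List.pyGet? data (m : Int) = some (data.getD m "") := by
        rw [PySem.List.pyGet?_natCast, List.getElem?_eq_getElem hm,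
          List.getD_eq_getElem data "" hm]
      have hchar : PySem.Str.pyGet? (data.getD m "") (n : Int)
          = some ((data.getD m "").toList[n]) := by
        rw [PySem.Str.pyGet?_natCast, List.getElem?_eq_getElem hn]
      simp only [hrow, hchar] at hcell
      exact ⟨m, n, hm, by omega, by omega, by omega, by omega, by omega, hn, hcell⟩
    · rw [if_neg hc] at hcell
      exact absurd hcell (by simp)
  · rintro ⟨i, j, hilen, hi1, hi2, hj1, hj2, hjW, hjr, hsym⟩
    simp only [List.any_eq_true, PySem.List.mem_pyRange_one]
    refine ⟨(j : Int), ⟨by omega, by omega⟩, (i : Int), ⟨by omega, by omega⟩, ?_⟩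
    rw [if_pos ⟨by omega, by omega, by omega, by omega⟩]
    have hrow : PySem.List.pyGet? data (i : Int) = some (data.getD i "") := by
      rw [PySem.List.pyGet?_natCast, List.getElem?_eq_getElem hilen,
        List.getD_eq_getElem data "" hilen]
    have hchar : PySem.Str.pyGet? (data.getD i "") (j : Int)
        = some ((data.getD i "").toList[j]) := by
      rw [PySem.Str.pyGet?_natCast, List.getElem?_eq_getElem hjr]
    simp only [hrow, hchar]
    exact hsym

lemma b_iff (start end_ y_data : Int) (data : List String) :
    has_symbolic_neighbours_alt start end_ y_data data = true ↔ pvFound start end_ y_data data := by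
  unfold has_symbolic_neighbours_alt pvFound
  by_cases hemp : data.isEmpty
  · rw [if_pos hemp]
    simp only [List.isEmpty_iff] at hemp
    subst hemp
    simp
  · rw [if_neg hemp]
    simp only [List.any_eq_true, List.mem_flatMap, List.mem_filterMap,
      PySem.List.mem_enumerate_iff, decide_eq_true_eq]
    constructor
    · rintro ⟨p, ⟨yr, ⟨i, hi, hyr⟩, xc, ⟨j, hj, hxc⟩, hif⟩, hc1, hc2, hc3, hc4, hc5⟩
      subst hyr
      subst hxc
      dsimp only at hj hif
      split_ifs at hif with hsym
      · obtain rfl := Option.some.inj hif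
        dsimp only at hc1 hc2 hc3 hc4 hc5 hsym
        have hrow : data.getD i "" = data[i] := List.getD_eq_getElem data "" hi
        refine ⟨i, j, hi, by omega, by omega, by omega, by omega, by omega, ?_, ?_⟩
        · rw [hrow]; exact hj
        · simp only [hrow]
          exact hsym
    · rintro ⟨i, j, hilen, hi1, hi2, hj1, hj2, hjW, hjr, hsym⟩
      have hrow : data.getD i "" = data[i] := List.getD_eq_getElem data "" hilen
      simp only [hrow] at hjr hsym
      refine ⟨(0 + (j : Int), 0 + (i : Int)),
        ⟨(0 + (i : Int), data[i]), ⟨i, hilen, rfl⟩,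
         (0 + (j : Int), (data[i].toList)[j]), ⟨j, hjr, rfl⟩, ?_⟩,
        by dsimp only; omega, by dsimp only; omega, by dsimp only; omega,
        by dsimp only; omega, by dsimp only; omega⟩
      dsimp only
      rw [if_pos hsym]

-- ===== VERDICT (by name: the statement is the Claim_ definition above) =====
theorem has_symbolic_neighbours_spec : Claim_equal_has_symbolic_neighbours := by
  intro start end_ y_data data _hdom hpre
  unfold Spec_has_symbolic_neighbours
  rw [Bool.eq_iff_iff, a_iff start end_ y_data data hpre, b_iff start end_ y_data data]
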